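-- pv_equiv track=rewrite | github.com/Will-Harris00/Countdown | countdown_docstrings.py | word_combinations
-- ===== SOURCE A (Python) =====
-- def word_combinations(letters_string):
--     """Finds every combination of available characters independent
--        of length and add these substrings to a list"""
--     sorted_string = "".join(sorted(letters_string))
--     comb_list = []
--     from itertools import combinations
--     for i in range(len(sorted_string), 0, -1):
--         for substring_letters_list in combinations(sorted_string, i):
--             substring_letters = "".join(substring_letters_list)
--             comb_list.append(substring_letters)
--     return comb_list
-- ===== SOURCE B (Python) =====
-- def word_combinations(letters_string):
--     """All non-empty combinations of the sorted letters, longest first: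
--     one include/exclude pass builds every subset in DFS order, then the
--     subsets are bucketed by length and emitted from longest to shortest."""
--     chars = sorted(letters_string)
--     subs = [[]]
--     for c in reversed(chars):
--         subs = [[c] + t for t in subs] + subs
--     buckets = [[] for _ in range(len(chars) + 1)]
--     for t in subs:
--         buckets[len(t)].append("".join(t))
--     out = []
--     for k in range(len(chars), 0, -1):
--         out += buckets[k]
--     return out
-- ===== Notes on version B (the rewrite author's own statement) =====
-- stated objective: alternative
-- what changed: Replaces A's per-length loop over itertools.combinations by a single include/exclude pass that builds all subsets once, then buckets them by length and concatenates buckets from longest to shortest.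
import Mathlib
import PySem

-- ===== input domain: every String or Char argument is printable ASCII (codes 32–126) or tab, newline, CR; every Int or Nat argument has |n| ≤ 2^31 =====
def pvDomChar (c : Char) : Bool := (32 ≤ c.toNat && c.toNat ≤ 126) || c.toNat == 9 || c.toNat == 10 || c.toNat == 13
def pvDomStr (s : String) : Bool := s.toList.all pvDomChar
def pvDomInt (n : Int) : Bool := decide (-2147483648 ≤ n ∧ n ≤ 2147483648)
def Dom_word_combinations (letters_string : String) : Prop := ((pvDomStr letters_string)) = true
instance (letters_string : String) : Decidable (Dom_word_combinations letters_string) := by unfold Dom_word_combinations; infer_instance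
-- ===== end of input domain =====

-- B replaces A's per-length itertools.combinations loop by a single include/exclude
-- subset pass followed by length-bucketing (objective: alternative decomposition).

-- ===== PORT A =====
-- port of itertools.combinations(xs, k) (tuples in lexicographic index order)
def pyCombinations : Nat → List Char → List (List Char)
  | 0, _ => [[]]
  | _ + 1, [] => []
  | k + 1, x :: xs => (pyCombinations k xs).map (fun t => x :: t) ++ pyCombinations (k + 1) xs

def word_combinations (letters_string : String) : List String :=
  let sorted_string := PySem.List.sorted letters_string.toList (fun c => c) false
  (PySem.List.pyRange (sorted_string.length : Int) 0 (-1)).foldl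
    (fun comb_list i =>
      (pyCombinations i.toNat sorted_string).foldl
        (fun acc substring_letters_list => acc ++ [String.ofList substring_letters_list]) comb_list)
    []

-- ===== PORT B =====
def word_combinations_alt (letters_string : String) : List String :=
  let chars := PySem.List.sorted letters_string.toList (fun c => c) false
  let subs := chars.reverse.foldl (fun subs c => subs.map (fun t => c :: t) ++ subs) [([] : List Char)]
  let buckets := subs.foldl
    (fun bs t => bs.set t.length (bs.getD t.length [] ++ [String.ofList t]))
    ((List.range (chars.length + 1)).map (fun _ => ([] : List String)))
  (PySem.List.pyRange (chars.length : Int) 0 (-1)).foldl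
    (fun out k => out ++ buckets.getD k.toNat []) []

-- ===== PRECONDITION & SPEC =====
def Spec_word_combinations (letters_string : String) (out : List String) : Prop := out = word_combinations_alt letters_string
instance (letters_string : String) (out : List String) : Decidable (Spec_word_combinations letters_string out) := by unfold Spec_word_combinations; infer_instance

-- ===== CLAIM (what is proved, stated in full; the proofs are below) =====
def Claim_equal_word_combinations : Prop := ∀ (letters_string : String), Dom_word_combinations letters_string → Spec_word_combinations letters_string (word_combinations letters_string)

-- ===== LEMMAS AND PROOFS =====

-- the include/exclude subset list, structurally (B's fold over the reversed chars computes it)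
def pvSubsets : List Char → List (List Char)
  | [] => [[]]
  | x :: xs => (pvSubsets xs).map (fun t => x :: t) ++ pvSubsets xs

theorem pvSubsets_eq_foldl (chars : List Char) :
    chars.reverse.foldl (fun subs c => subs.map (fun t => c :: t) ++ subs) [([] : List Char)]
      = pvSubsets chars := by
  rw [List.foldl_reverse]
  induction chars with
  | nil => rfl
  | cons x xs ih => simp [pvSubsets, ih]

theorem pvSubsets_filter_len (chars : List Char) (k : Nat) :
    (pvSubsets chars).filter (fun t => t.length == k) = pyCombinations k chars := by
  induction chars generalizing k with
  | nil =>
    cases k with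
    | zero => rfl
    | succ k => rfl
  | cons x xs ih =>
    cases k with
    | zero =>
      have h1 : (List.filter ((fun t => (t : List Char).length == 0) ∘ fun t => x :: t) (pvSubsets xs)) = [] := by
        apply List.filter_eq_nil_iff.mpr; intro t _; simp
      simp [pvSubsets, pyCombinations, List.filter_append, List.filter_map, h1, ih 0]
    | succ k =>
      have h2 : ((fun t => (t : List Char).length == k + 1) ∘ fun t => x :: t) = (fun t => t.length == k) := by
        funext t; simp
      simp [pvSubsets, pyCombinations, List.filter_append, List.filter_map, h2, ih]

theorem pvSubsets_len_le (chars : List Char) : ∀ t ∈ pvSubsets chars, t.length ≤ chars.length := by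
  induction chars with
  | nil => intro t ht; simp [pvSubsets] at ht; simp [ht]
  | cons x xs ih =>
    intro t ht
    simp only [pvSubsets, List.mem_append, List.mem_map] at ht
    rcases ht with ⟨u, hu, rfl⟩ | ht
    · simpa using ih u hu
    · exact Nat.le_succ_of_le (ih t ht)

theorem pv_getD_set (bs : List (List String)) (i j : Nat) (v : List String) (hi : i < bs.length) :
    (bs.set i v).getD j [] = if i = j then v else bs.getD j [] := by
  unfold List.getD
  by_cases h : i = j
  · subst h; simp [List.getElem?_set_self hi]
  · simp [List.getElem?_set_ne h, h]

theorem pv_buckets_getD (ts : List (List Char)) (bs : List (List String))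
    (hts : ∀ t ∈ ts, t.length < bs.length) (j : Nat) (hj : j < bs.length) :
    (ts.foldl (fun bs t => bs.set t.length (bs.getD t.length [] ++ [String.ofList t])) bs).getD j []
      = bs.getD j [] ++ (ts.filter (fun t => t.length == j)).map String.ofList := by
  induction ts generalizing bs with
  | nil => simp
  | cons t ts ih =>
    have hlt : t.length < bs.length := hts t (by simp)
    have hlen : (bs.set t.length (bs.getD t.length [] ++ [String.ofList t])).length = bs.length := by
      simp
    rw [List.foldl_cons, ih _ (by intro u hu; rw [hlen]; exact hts u (by simp [hu])) (by omega),
      pv_getD_set bs t.length j _ hlt]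
    by_cases h : t.length = j
    · simp [h]
    · have h' : (t.length == j) = false := by simpa using h
      simp [h', h]

theorem pv_mem_pyRange_desc (n : Nat) (x : Int) :
    x ∈ PySem.List.pyRange (n : Int) 0 (-1) → 1 ≤ x ∧ x ≤ (n : Int) := by
  induction n with
  | zero => intro hx; simp [show PySem.List.pyRange (0 : Int) 0 (-1) = [] from rfl] at hx
  | succ n ih =>
    intro hx
    rw [PySem.List.pyRange_neg_one_cons (by exact_mod_cast Nat.succ_pos n)] at hx
    rcases List.mem_cons.mp hx with rfl | hx
    · constructor <;> [exact_mod_cast Nat.succ_pos n; exact le_refl _]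
    · have hx' : x ∈ PySem.List.pyRange (n : Int) 0 (-1) := by
        have : ((n + 1 : Nat) : Int) - 1 = (n : Int) := by push_cast; ring
        rwa [this] at hx
      have := ih hx'
      constructor
      · exact this.1
      · exact le_trans this.2 (by push_cast; omega)

-- ===== VERDICT (by name: the statement is the Claim_ definition above) =====
theorem word_combinations_spec : Claim_equal_word_combinations := by
  intro s _
  unfold Spec_word_combinations word_combinations word_combinations_alt
  simp only []
  set chars := PySem.List.sorted s.toList (fun c => c) false with hchars
  -- A's inner loop is an append of the mapped combinations
  have hA : ∀ (acc : List String) (i : Int),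
      (pyCombinations i.toNat chars).foldl (fun acc t => acc ++ [String.ofList t]) acc
        = acc ++ (pyCombinations i.toNat chars).map String.ofList := by
    intro acc i; exact PySem.List.foldl_append_singleton_eq_map _ _ _
  -- B's buckets hold exactly the mapped combinations
  have hB : ∀ j : Nat, j < chars.length + 1 →
      ((chars.reverse.foldl (fun subs c => subs.map (fun t => c :: t) ++ subs) [([] : List Char)]).foldl
        (fun bs t => bs.set t.length (bs.getD t.length [] ++ [String.ofList t]))
        ((List.range (chars.length + 1)).map (fun _ => ([] : List String)))).getD j []
        = (pyCombinations j chars).map String.ofList := by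
    intro j hj
    rw [pvSubsets_eq_foldl]
    rw [pv_buckets_getD _ _ (by
        intro t ht
        have := pvSubsets_len_le chars t ht
        simp only [List.length_map, List.length_range]
        omega) j (by simp only [List.length_map, List.length_range]; exact hj)]
    have hinit : ((List.range (chars.length + 1)).map (fun _ => ([] : List String))).getD j [] = [] := by
      have hlt : j < ((List.range (chars.length + 1)).map (fun _ => ([] : List String))).length := by
        simpa using hj
      unfold List.getD
      rw [List.getElem?_eq_getElem hlt]
      simp
    rw [hinit, pvSubsets_filter_len]
    rfl
  calc (PySem.List.pyRange (chars.length : Int) 0 (-1)).foldl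
        (fun comb_list i =>
          (pyCombinations i.toNat chars).foldl (fun acc t => acc ++ [String.ofList t]) comb_list) []
      = (PySem.List.pyRange (chars.length : Int) 0 (-1)).foldl
          (fun acc i => acc ++ (pyCombinations i.toNat chars).map String.ofList) [] := by
        apply PySem.List.foldl_congr_mem
        intro acc i _; exact hA acc i
    _ = (PySem.List.pyRange (chars.length : Int) 0 (-1)).foldl
          (fun out k =>
            out ++ ((chars.reverse.foldl (fun subs c => subs.map (fun t => c :: t) ++ subs)
                [([] : List Char)]).foldl
              (fun bs t => bs.set t.length (bs.getD t.length [] ++ [String.ofList t]))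
              ((List.range (chars.length + 1)).map (fun _ => ([] : List String)))).getD k.toNat []) [] := by
        apply PySem.List.foldl_congr_mem
        intro acc k hk
        have hb := pv_mem_pyRange_desc chars.length k hk
        have hklt : k.toNat < chars.length + 1 := by omega
        rw [hB k.toNat hklt]
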